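-- pv_equiv track=rewrite | github.com/chen0430tw/treesea | tree_diagram/tree_diagram/io/himawari_extract.py | _pick_primary_variable
-- ===== SOURCE A (Python) =====
-- from typing import Dict, Iterable, Tuple
--
-- def _pick_primary_variable(var_names: Iterable[str]) -> str:
--     names = tuple(var_names)
--     preferred_exact = (
--         "tbb_13",
--         "tbb_14",
--         "tbb_15",
--         "tbb_07",
--         "tbb",
--     )
--     for name in preferred_exact:
--         if name in names:
--             return name
--     preferred_prefix = ("tbb_", "albedo_", "radiance")
--     for prefix in preferred_prefix:
--         for name in names:
--             if name.startswith(prefix):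
--                 return name
--     if not names:
--         raise ValueError("dataset contains no data variables")
--     return names[0]
-- ===== SOURCE B (Python) =====
-- def _pick_primary_variable(var_names):
--     names = tuple(var_names)
--     if not names:
--         raise ValueError("dataset contains no data variables")
--     preferred_exact = ("tbb_13", "tbb_14", "tbb_15", "tbb_07", "tbb")
--     preferred_prefix = ("tbb_", "albedo_", "radiance")
--
--     def key(pos, name):
--         if name in preferred_exact:
--             return (0, preferred_exact.index(name), 0)
--         for j, p in enumerate(preferred_prefix):
--             if name.startswith(p):
--                 return (1, j, pos)
--         return (2, 0, pos)
--
--     best_key, best_name = key(0, names[0]), names[0]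
--     for pos in range(1, len(names)):
--         k = key(pos, names[pos])
--         if k < best_key:
--             best_key, best_name = k, names[pos]
--     return best_name
-- ===== Notes on version B (the rewrite author's own statement) =====
-- stated objective: alternative
-- what changed: Replaces A's cascade of scans (5 membership tests over names, then 3 prefix scans over names) by a single pass over names that assigns each name a lexicographic priority key (class, preference-index, position) and keeps the running arg-min.
import Mathlib
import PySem

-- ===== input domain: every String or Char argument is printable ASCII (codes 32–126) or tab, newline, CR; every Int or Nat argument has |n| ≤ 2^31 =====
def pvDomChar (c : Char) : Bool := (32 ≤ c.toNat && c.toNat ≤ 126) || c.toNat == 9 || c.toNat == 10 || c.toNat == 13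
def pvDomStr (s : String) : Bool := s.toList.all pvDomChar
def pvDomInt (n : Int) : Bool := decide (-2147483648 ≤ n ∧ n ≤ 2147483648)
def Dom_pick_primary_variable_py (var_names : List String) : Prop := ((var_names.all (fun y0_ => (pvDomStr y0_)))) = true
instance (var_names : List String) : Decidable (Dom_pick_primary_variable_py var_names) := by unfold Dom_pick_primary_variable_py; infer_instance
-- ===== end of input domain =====

-- B replaces A's cascade of scans over the name list by one keyed pass with a running arg-min (alternative decomposition, same cost).


-- ===== PORT A =====
-- 'for name in preferred_exact: if name in names: return name'
def pickA_exact (names : List String) : List String → Option String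
  | [] => none
  | n :: rest => if names.contains n then some n else pickA_exact names rest

-- inner 'for name in names: if name.startswith(prefix): return name'
def pickA_inner (p : String) : List String → Option String
  | [] => none
  | n :: rest => if PySem.Str.startswith n p then some n else pickA_inner p rest

-- outer 'for prefix in preferred_prefix: …'
def pickA_prefix (names : List String) : List String → Option String
  | [] => none
  | p :: ps =>
    match pickA_inner p names with
    | some n => some n
    | none => pickA_prefix names ps

def pick_primary_variable_py (var_names : List String) : String :=
  match pickA_exact var_names ["tbb_13", "tbb_14", "tbb_15", "tbb_07", "tbb"] with
  | some n => n
  | none =>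
    match pickA_prefix var_names ["tbb_", "albedo_", "radiance"] with
    | some n => n
    | none => var_names.headD ""   -- 'raise ValueError' on empty names is excluded by Pre_

-- ===== PORT B =====
-- 'for j, p in enumerate(preferred_prefix): if name.startswith(p): return (1, j, pos)'
def pickB_pref : List String → Nat → String → Option Nat
  | [], _, _ => none
  | p :: ps, j, n => if PySem.Str.startswith n p then some j else pickB_pref ps (j + 1) n

-- the priority key (class, preference-index, position)
def pickB_key (pos : Nat) (n : String) : Nat × Nat × Nat :=
  if ["tbb_13", "tbb_14", "tbb_15", "tbb_07", "tbb"].contains n then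
    (0, ["tbb_13", "tbb_14", "tbb_15", "tbb_07", "tbb"].idxOf n, 0)
  else
    match pickB_pref ["tbb_", "albedo_", "radiance"] 0 n with
    | some j => (1, j, pos)
    | none => (2, 0, pos)

-- Python tuple '<' on the 3-tuples (lexicographic)
def kLt (a b : Nat × Nat × Nat) : Bool :=
  if a.1 < b.1 then true
  else if b.1 < a.1 then false
  else if a.2.1 < b.2.1 then true
  else if b.2.1 < a.2.1 then false
  else decide (a.2.2 < b.2.2)

-- 'for pos in range(1, len(names)): …' keeping the running arg-min
def pickB_fold : List String → Nat → (Nat × Nat × Nat) × String → (Nat × Nat × Nat) × String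
  | [], _, best => best
  | n :: rest, pos, best =>
    pickB_fold rest (pos + 1)
      (if kLt (pickB_key pos n) best.1 then (pickB_key pos n, n) else best)

def pick_primary_variable_py_alt (var_names : List String) : String :=
  match var_names with
  | [] => ""   -- 'raise ValueError' on empty names is excluded by Pre_
  | n0 :: rest => (pickB_fold rest 1 (pickB_key 0 n0, n0)).2

-- ===== PRECONDITION & SPEC =====
-- Pre_ excludes exactly the empty list, on which A raises ValueError.
def Pre_pick_primary_variable_py (var_names : List String) : Prop := var_names ≠ []
instance (var_names : List String) : Decidable (Pre_pick_primary_variable_py var_names) := by unfold Pre_pick_primary_variable_py; infer_instance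
def pvWitness_pick_primary_variable_py : List String := ["tbb_14", "foo"]

def Spec_pick_primary_variable_py (var_names : List String) (out : String) : Prop := out = pick_primary_variable_py_alt var_names
instance (var_names : List String) (out : String) : Decidable (Spec_pick_primary_variable_py var_names out) := by unfold Spec_pick_primary_variable_py; infer_instance

-- ===== CLAIM (what is proved, stated in full; the proofs are below) =====
def Claim_equal_pick_primary_variable_py : Prop := ∀ (var_names : List String), Dom_pick_primary_variable_py var_names → Pre_pick_primary_variable_py var_names → Spec_pick_primary_variable_py var_names (pick_primary_variable_py var_names)

-- ===== LEMMAS AND PROOFS =====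

-- kLt is a strict linear order on the key triples
theorem kLt_asymm {a b : Nat × Nat × Nat} (h : kLt a b = true) : kLt b a = false := by
  unfold kLt at *; split_ifs at * <;> simp_all <;> omega

theorem kLt_le_trans {a b c : Nat × Nat × Nat} (h1 : kLt b a = false) (h2 : kLt c b = false) :
    kLt c a = false := by
  unfold kLt at *; split_ifs at * <;> simp_all <;> omega

theorem kLt_antisymm {a b : Nat × Nat × Nat} (h1 : kLt a b = false) (h2 : kLt b a = false) :
    a = b := by
  obtain ⟨a1, a2, a3⟩ := a; obtain ⟨b1, b2, b3⟩ := b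
  unfold kLt at h1 h2; simp only [Prod.mk.injEq]
  split_ifs at h1 h2 <;> simp_all <;> omega

-- the fold returns an element (or the initial best) whose key no scanned key beats
theorem kLt_irrefl (a : Nat × Nat × Nat) : kLt a a = false := by
  unfold kLt; split_ifs <;> simp_all <;> omega

theorem pickB_fold_spec (l : List String) (pos : Nat) (best : (Nat × Nat × Nat) × String) :
    ((pickB_fold l pos best = best) ∨
      (∃ i, ∃ h : i < l.length, pickB_fold l pos best = (pickB_key (pos + i) l[i], l[i]))) ∧
    kLt best.1 (pickB_fold l pos best).1 = false ∧
    (∀ i, ∀ _ : i < l.length, kLt (pickB_key (pos + i) l[i]) (pickB_fold l pos best).1 = false) := by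
  induction l generalizing pos best with
  | nil =>
    refine ⟨Or.inl rfl, kLt_irrefl _, ?_⟩
    · intro i h; simp at h
  | cons n t ih =>
    set best' := (if kLt (pickB_key pos n) best.1 then (pickB_key pos n, n) else best) with hb'
    have hstep : pickB_fold (n :: t) pos best = pickB_fold t (pos + 1) best' := rfl
    obtain ⟨h1, h2, h3⟩ := ih (pos + 1) best'
    have hbb : kLt best.1 best'.1 = false := by
      rw [hb']; split_ifs with hc
      · exact kLt_asymm hc
      · exact kLt_irrefl _
    have hnb : kLt (pickB_key pos n) best'.1 = false := by
      rw [hb']; split_ifs with hc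
      · exact kLt_irrefl _
      · simpa using hc
    refine ⟨?_, ?_, ?_⟩
    · rcases h1 with h1 | ⟨i, hi, h1⟩
      · rw [hstep, h1, hb']
        split_ifs with hc
        · exact Or.inr ⟨0, by simp, by simp⟩
        · exact Or.inl rfl
      · refine Or.inr ⟨i + 1, by simpa using hi, ?_⟩
        rw [hstep, h1]
        have hpp : pos + (i + 1) = pos + 1 + i := by omega
        simp [hpp]
    · rw [hstep]; exact kLt_le_trans h2 hbb
    · intro i hi
      rw [hstep]
      match i with
      | 0 => simpa using kLt_le_trans h2 hnb
      | i + 1 =>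
        have := h3 i (by simpa using hi)
        simpa [Nat.add_comm, Nat.add_assoc, Nat.add_left_comm] using this
    
-- characterisation of A's inner prefix scan
theorem pickA_inner_some {p : String} {names : List String} {m : String}
    (h : pickA_inner p names = some m) :
    ∃ i, ∃ hi : i < names.length, names[i] = m ∧ PySem.Str.startswith m p = true ∧
      ∀ j, ∀ _ : j < names.length, j < i → PySem.Str.startswith names[j] p = false := by
  induction names with
  | nil => simp [pickA_inner] at h
  | cons n t ih =>
    unfold pickA_inner at h
    split_ifs at h with hs
    · obtain rfl : n = m := Option.some.inj h
      exact ⟨0, by simp, by simp, hs, fun j _ hj => absurd hj (by omega)⟩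
    · have hs' : PySem.Str.startswith n p = false := by
        revert hs; cases PySem.Str.startswith n p <;> simp
      obtain ⟨i, hi, h1, h2, h3⟩ := ih h
      refine ⟨i + 1, by simpa using hi, by simpa using h1, h2, ?_⟩
      intro j hj hji
      match j with
      | 0 => simpa using hs'
      | j + 1 => exact h3 j (by simpa using hj) (by omega)

theorem pickA_inner_none {p : String} {names : List String}
    (h : pickA_inner p names = none) :
    ∀ n ∈ names, PySem.Str.startswith n p = false := by
  induction names with
  | nil => simp
  | cons n t ih =>
    unfold pickA_inner at h
    split_ifs at h with hs
    have hs' : PySem.Str.startswith n p = false := by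
      revert hs; cases PySem.Str.startswith n p <;> simp
    intro x hx
    rcases List.mem_cons.mp hx with rfl | hx'
    · exact hs'
    · exact ih h x hx'

-- characterisation of A's exact scan
theorem pickA_exact_some {names es : List String} {e : String}
    (h : pickA_exact names es = some e) :
    ∃ k, ∃ hk : k < es.length, es[k] = e ∧ names.contains e = true ∧
      ∀ j, ∀ _ : j < es.length, j < k → names.contains es[j] = false := by
  induction es with
  | nil => simp [pickA_exact] at h
  | cons x xs ih =>
    unfold pickA_exact at h
    split_ifs at h with hs
    · obtain rfl : x = e := Option.some.inj h
      exact ⟨0, by simp, by simp, hs, fun j _ hj => absurd hj (by omega)⟩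
    · have hs' : names.contains x = false := by
        revert hs; cases names.contains x <;> simp
      obtain ⟨k, hk, h1, h2, h3⟩ := ih h
      refine ⟨k + 1, by simpa using hk, by simpa using h1, h2, ?_⟩
      intro j hj hjk
      match j with
      | 0 => simpa using hs'
      | j + 1 => exact h3 j (by simpa using hj) (by omega)

theorem pickA_exact_none {names es : List String}
    (h : pickA_exact names es = none) :
    ∀ x ∈ es, names.contains x = false := by
  induction es with
  | nil => simp
  | cons x xs ih =>
    unfold pickA_exact at h
    split_ifs at h with hs
    have hs' : names.contains x = false := by
      revert hs; cases names.contains x <;> simp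
    intro y hy
    rcases List.mem_cons.mp hy with rfl | hy'
    · exact hs'
    · exact ih h y hy'

-- any element achieving-- any element achieving a minimal key makes the fold return A's answer
theorem fold_determines {n0 : String} {rest : List String} {kstar : Nat × Nat × Nat} {a : String}
    (hmin : ∀ i, ∀ _ : i < (n0 :: rest).length, kLt (pickB_key i (n0 :: rest)[i]) kstar = false)
    (hwit : ∃ i, ∃ _ : i < (n0 :: rest).length, pickB_key i (n0 :: rest)[i] = kstar)
    (huni : ∀ i, ∀ _ : i < (n0 :: rest).length, pickB_key i (n0 :: rest)[i] = kstar → (n0 :: rest)[i] = a) :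
    (pickB_fold rest 1 (pickB_key 0 n0, n0)).2 = a := by
  obtain ⟨helem, hinit, hall⟩ := pickB_fold_spec rest 1 (pickB_key 0 n0, n0)
  set r := pickB_fold rest 1 (pickB_key 0 n0, n0) with hr
  -- r is (key i, names[i]) for some i of the full list
  have hrel : ∃ i, ∃ hi : i < (n0 :: rest).length, r = (pickB_key i (n0 :: rest)[i], (n0 :: rest)[i]) := by
    rcases helem with h | ⟨i, hi, h⟩
    · exact ⟨0, by simp, by simpa using h⟩
    · exact ⟨i + 1, by simpa using hi, by simpa [Nat.add_comm] using h⟩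
  obtain ⟨i, hi, hrei⟩ := hrel
  -- kstar ≤ r.1 : some element has key kstar, and no scanned key beats r.1
  have hks : kLt kstar r.1 = false := by
    obtain ⟨w, hw, hwk⟩ := hwit
    match w with
    | 0 => rw [← hwk]; simpa using hinit
    | w + 1 =>
      rw [← hwk]
      have := hall w (by simpa using hw)
      simpa [Nat.add_comm] using this
  -- r.1 ≤ kstar : r's key is an element key, all of which kstar bounds
  have hrk : kLt r.1 kstar = false := by
    rw [hrei]; exact hmin i hi
  have : pickB_key i (n0 :: rest)[i] = kstar := by
    have := kLt_antisymm hrk hks; rw [hrei] at this; exact this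
  rw [hrei]
  exact huni i hi this


-- evaluation helpers for kLt, pickB_pref and pickB_key
theorem kLt_false_of {a1 a2 a3 b1 b2 b3 : Nat}
    (h : b1 < a1 ∨ (a1 = b1 ∧ (b2 < a2 ∨ (a2 = b2 ∧ b3 ≤ a3)))) :
    kLt (a1, a2, a3) (b1, b2, b3) = false := by
  unfold kLt; split_ifs <;> simp_all <;> omega

theorem pref_eval (n : String) :
    pickB_pref ["tbb_", "albedo_", "radiance"] 0 n =
      (if PySem.Str.startswith n "tbb_" then some 0
       else if PySem.Str.startswith n "albedo_" then some 1
       else if PySem.Str.startswith n "radiance" then some 2 else none) := by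
  simp only [pickB_pref]

theorem key_eval_exact {n : String} (pos : Nat)
    (h : (["tbb_13", "tbb_14", "tbb_15", "tbb_07", "tbb"] : List String).contains n = true) :
    pickB_key pos n = (0, (["tbb_13", "tbb_14", "tbb_15", "tbb_07", "tbb"] : List String).idxOf n, 0) := by
  unfold pickB_key; simp only [h]; simp

theorem key_eval_pref {n : String} {j : Nat} (pos : Nat)
    (h : (["tbb_13", "tbb_14", "tbb_15", "tbb_07", "tbb"] : List String).contains n = false)
    (h2 : pickB_pref ["tbb_", "albedo_", "radiance"] 0 n = some j) :
    pickB_key pos n = (1, j, pos) := by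
  unfold pickB_key; simp only [h, h2]; simp

theorem key_eval_fallback {n : String} (pos : Nat)
    (h : (["tbb_13", "tbb_14", "tbb_15", "tbb_07", "tbb"] : List String).contains n = false)
    (h2 : pickB_pref ["tbb_", "albedo_", "radiance"] 0 n = none) :
    pickB_key pos n = (2, 0, pos) := by
  unfold pickB_key; simp only [h, h2]; simp

-- case 1: some exact-preferred name occurs in names
theorem case_exact (n0 : String) (rest : List String) (e : String)
    (hE : pickA_exact (n0 :: rest) ["tbb_13", "tbb_14", "tbb_15", "tbb_07", "tbb"] = some e) :
    (pickB_fold rest 1 (pickB_key 0 n0, n0)).2 = e := by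
  obtain ⟨k, hk, hEk, hmem, hprev⟩ := pickA_exact_some hE
  have hk5 : k < 5 := by simpa using hk
  have hidx : (["tbb_13", "tbb_14", "tbb_15", "tbb_07", "tbb"] : List String).idxOf e = k := by
    subst hEk; interval_cases k <;> rfl
  refine fold_determines (kstar := (0, k, 0)) (a := e) ?_ ?_ ?_
  · intro i hi
    by_cases hc : (["tbb_13", "tbb_14", "tbb_15", "tbb_07", "tbb"] : List String).contains (n0 :: rest)[i] = true
    · rw [key_eval_exact i hc]
      have hmemE := List.contains_iff_mem.mp hc
      have hlt := List.idxOf_lt_length_of_mem hmemE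
      have hge : ¬ ((["tbb_13", "tbb_14", "tbb_15", "tbb_07", "tbb"] : List String).idxOf (n0 :: rest)[i] < k) := by
        intro hlt'
        have h1 := hprev _ hlt hlt'
        rw [List.getElem_idxOf hlt] at h1
        have h2 : (n0 :: rest).contains (n0 :: rest)[i] = true :=
          List.contains_iff_mem.mpr (List.getElem_mem hi)
        simp_all
      exact kLt_false_of (by omega)
    · simp only [Bool.not_eq_true] at hc
      cases hp : pickB_pref ["tbb_", "albedo_", "radiance"] 0 (n0 :: rest)[i] with
      | some j => rw [key_eval_pref i hc hp]; exact kLt_false_of (by omega)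
      | none => rw [key_eval_fallback i hc hp]; exact kLt_false_of (by omega)
  · have he : e ∈ (n0 :: rest) := List.contains_iff_mem.mp hmem
    obtain ⟨i, hi, hie⟩ := List.getElem_of_mem he
    refine ⟨i, hi, ?_⟩
    rw [hie]
    have hce : (["tbb_13", "tbb_14", "tbb_15", "tbb_07", "tbb"] : List String).contains e = true :=
      List.contains_iff_mem.mpr (hEk ▸ List.getElem_mem hk)
    rw [key_eval_exact i hce, hidx]
  · intro i hi hkey
    by_cases hc : (["tbb_13", "tbb_14", "tbb_15", "tbb_07", "tbb"] : List String).contains (n0 :: rest)[i] = true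
    · rw [key_eval_exact i hc] at hkey
      have hkk : (["tbb_13", "tbb_14", "tbb_15", "tbb_07", "tbb"] : List String).idxOf (n0 :: rest)[i] = k := by
        simpa using hkey
      have hmemE := List.contains_iff_mem.mp hc
      have hgi := List.getElem_idxOf (List.idxOf_lt_length_of_mem hmemE)
      simp only [hkk] at hgi
      rw [← hgi]
      exact hEk
    · simp only [Bool.not_eq_true] at hc
      cases hp : pickB_pref ["tbb_", "albedo_", "radiance"] 0 (n0 :: rest)[i] with
      | some j => rw [key_eval_pref i hc hp] at hkey; simp at hkey
      | none => rw [key_eval_fallback i hc hp] at hkey; simp at hkey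

-- from 'no exact name occurs': every name is outside the exact-preferred list
theorem no_exact_contains {names : List String}
    (hE : pickA_exact names ["tbb_13", "tbb_14", "tbb_15", "tbb_07", "tbb"] = none) :
    ∀ n ∈ names, (["tbb_13", "tbb_14", "tbb_15", "tbb_07", "tbb"] : List String).contains n = false := by
  intro n hn
  cases hcE : (["tbb_13", "tbb_14", "tbb_15", "tbb_07", "tbb"] : List String).contains n with
  | false => rfl
  | true =>
    have h1 := pickA_exact_none hE n (List.contains_iff_mem.mp hcE)
    have h2 : names.contains n = true := List.contains_iff_mem.mpr hn
    simp_all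

-- case 2: no exact name, some name matches a preferred prefix
theorem case_prefix (n0 : String) (rest : List String) (m : String)
    (hE : pickA_exact (n0 :: rest) ["tbb_13", "tbb_14", "tbb_15", "tbb_07", "tbb"] = none)
    (hP : pickA_prefix (n0 :: rest) ["tbb_", "albedo_", "radiance"] = some m) :
    (pickB_fold rest 1 (pickB_key 0 n0, n0)).2 = m := by
  have hnoE := no_exact_contains hE
  cases h0 : pickA_inner "tbb_" (n0 :: rest) with
  | some m0 =>
    have hm0 : m0 = m := by
      simp only [pickA_prefix, h0] at hP; exact Option.some.inj hP
    subst hm0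
    obtain ⟨im, him, hm1, hm2, hm3⟩ := pickA_inner_some h0
    refine fold_determines (kstar := (1, 0, im)) (a := m0) ?_ ?_ ?_
    · intro i hi
      have hcE := hnoE _ (List.getElem_mem hi)
      by_cases hswt : PySem.Str.startswith (n0 :: rest)[i] "tbb_" = true
      · have hp : pickB_pref ["tbb_", "albedo_", "radiance"] 0 (n0 :: rest)[i] = some 0 := by
          rw [pref_eval, hswt]; simp
        rw [key_eval_pref i hcE hp]
        have hge : ¬ (i < im) := fun hlt => by
          have := hm3 i hi hlt; simp_all
        exact kLt_false_of (by omega)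
      · simp only [Bool.not_eq_true] at hswt
        by_cases hswa : PySem.Str.startswith (n0 :: rest)[i] "albedo_" = true
        · have hp : pickB_pref ["tbb_", "albedo_", "radiance"] 0 (n0 :: rest)[i] = some 1 := by
            rw [pref_eval, hswt, hswa]; simp
          rw [key_eval_pref i hcE hp]; exact kLt_false_of (by omega)
        · simp only [Bool.not_eq_true] at hswa
          by_cases hswr : PySem.Str.startswith (n0 :: rest)[i] "radiance" = true
          · have hp : pickB_pref ["tbb_", "albedo_", "radiance"] 0 (n0 :: rest)[i] = some 2 := by
              rw [pref_eval, hswt, hswa, hswr]; simp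
            rw [key_eval_pref i hcE hp]; exact kLt_false_of (by omega)
          · simp only [Bool.not_eq_true] at hswr
            have hp : pickB_pref ["tbb_", "albedo_", "radiance"] 0 (n0 :: rest)[i] = none := by
              rw [pref_eval, hswt, hswa, hswr]; simp
            rw [key_eval_fallback i hcE hp]; exact kLt_false_of (by omega)
    · refine ⟨im, him, ?_⟩
      rw [hm1]
      have hcm := hnoE m0 (hm1 ▸ List.getElem_mem him)
      have hp : pickB_pref ["tbb_", "albedo_", "radiance"] 0 m0 = some 0 := by
        rw [pref_eval, hm2]; simp
      rw [key_eval_pref im hcm hp]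
    · intro i hi hkey
      have hcE := hnoE _ (List.getElem_mem hi)
      by_cases hswt : PySem.Str.startswith (n0 :: rest)[i] "tbb_" = true
      · have hp : pickB_pref ["tbb_", "albedo_", "radiance"] 0 (n0 :: rest)[i] = some 0 := by
          rw [pref_eval, hswt]; simp
        rw [key_eval_pref i hcE hp] at hkey
        have : i = im := by simpa using hkey
        subst this; exact hm1
      · simp only [Bool.not_eq_true] at hswt
        by_cases hswa : PySem.Str.startswith (n0 :: rest)[i] "albedo_" = true
        · have hp : pickB_pref ["tbb_", "albedo_", "radiance"] 0 (n0 :: rest)[i] = some 1 := by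
            rw [pref_eval, hswt, hswa]; simp
          rw [key_eval_pref i hcE hp] at hkey; simp at hkey
        · simp only [Bool.not_eq_true] at hswa
          by_cases hswr : PySem.Str.startswith (n0 :: rest)[i] "radiance" = true
          · have hp : pickB_pref ["tbb_", "albedo_", "radiance"] 0 (n0 :: rest)[i] = some 2 := by
              rw [pref_eval, hswt, hswa, hswr]; simp
            rw [key_eval_pref i hcE hp] at hkey; simp at hkey
          · simp only [Bool.not_eq_true] at hswr
            have hp : pickB_pref ["tbb_", "albedo_", "radiance"] 0 (n0 :: rest)[i] = none := by
              rw [pref_eval, hswt, hswa, hswr]; simp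
            rw [key_eval_fallback i hcE hp] at hkey; simp at hkey
  | none =>
    have hsw0 := pickA_inner_none h0
    cases h1 : pickA_inner "albedo_" (n0 :: rest) with
    | some m1 =>
      have hm1e : m1 = m := by
        simp only [pickA_prefix, h0, h1] at hP; exact Option.some.inj hP
      subst hm1e
      obtain ⟨im, him, hm1, hm2, hm3⟩ := pickA_inner_some h1
      refine fold_determines (kstar := (1, 1, im)) (a := m1) ?_ ?_ ?_
      · intro i hi
        have hcE := hnoE _ (List.getElem_mem hi)
        have hswt := hsw0 _ (List.getElem_mem hi)
        by_cases hswa : PySem.Str.startswith (n0 :: rest)[i] "albedo_" = true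
        · have hp : pickB_pref ["tbb_", "albedo_", "radiance"] 0 (n0 :: rest)[i] = some 1 := by
            rw [pref_eval, hswt, hswa]; simp
          rw [key_eval_pref i hcE hp]
          have hge : ¬ (i < im) := fun hlt => by
            have := hm3 i hi hlt; simp_all
          exact kLt_false_of (by omega)
        · simp only [Bool.not_eq_true] at hswa
          by_cases hswr : PySem.Str.startswith (n0 :: rest)[i] "radiance" = true
          · have hp : pickB_pref ["tbb_", "albedo_", "radiance"] 0 (n0 :: rest)[i] = some 2 := by
              rw [pref_eval, hswt, hswa, hswr]; simp
            rw [key_eval_pref i hcE hp]; exact kLt_false_of (by omega)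
          · simp only [Bool.not_eq_true] at hswr
            have hp : pickB_pref ["tbb_", "albedo_", "radiance"] 0 (n0 :: rest)[i] = none := by
              rw [pref_eval, hswt, hswa, hswr]; simp
            rw [key_eval_fallback i hcE hp]; exact kLt_false_of (by omega)
      · refine ⟨im, him, ?_⟩
        rw [hm1]
        have hcm := hnoE m1 (hm1 ▸ List.getElem_mem him)
        have hswt := hsw0 m1 (hm1 ▸ List.getElem_mem him)
        have hp : pickB_pref ["tbb_", "albedo_", "radiance"] 0 m1 = some 1 := by
          rw [pref_eval, hswt, hm2]; simp
        rw [key_eval_pref im hcm hp]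
      · intro i hi hkey
        have hcE := hnoE _ (List.getElem_mem hi)
        have hswt := hsw0 _ (List.getElem_mem hi)
        by_cases hswa : PySem.Str.startswith (n0 :: rest)[i] "albedo_" = true
        · have hp : pickB_pref ["tbb_", "albedo_", "radiance"] 0 (n0 :: rest)[i] = some 1 := by
            rw [pref_eval, hswt, hswa]; simp
          rw [key_eval_pref i hcE hp] at hkey
          have : i = im := by simpa using hkey
          subst this; exact hm1
        · simp only [Bool.not_eq_true] at hswa
          by_cases hswr : PySem.Str.startswith (n0 :: rest)[i] "radiance" = true
          · have hp : pickB_pref ["tbb_", "albedo_", "radiance"] 0 (n0 :: rest)[i] = some 2 := by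
              rw [pref_eval, hswt, hswa, hswr]; simp
            rw [key_eval_pref i hcE hp] at hkey; simp at hkey
          · simp only [Bool.not_eq_true] at hswr
            have hp : pickB_pref ["tbb_", "albedo_", "radiance"] 0 (n0 :: rest)[i] = none := by
              rw [pref_eval, hswt, hswa, hswr]; simp
            rw [key_eval_fallback i hcE hp] at hkey; simp at hkey
    | none =>
      have hsw1 := pickA_inner_none h1
      cases h2 : pickA_inner "radiance" (n0 :: rest) with
      | some m2 =>
        have hm2e : m2 = m := by
          simp only [pickA_prefix, h0, h1, h2] at hP; exact Option.some.inj hP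
        subst hm2e
        obtain ⟨im, him, hm1, hm2, hm3⟩ := pickA_inner_some h2
        refine fold_determines (kstar := (1, 2, im)) (a := m2) ?_ ?_ ?_
        · intro i hi
          have hcE := hnoE _ (List.getElem_mem hi)
          have hswt := hsw0 _ (List.getElem_mem hi)
          have hswa := hsw1 _ (List.getElem_mem hi)
          by_cases hswr : PySem.Str.startswith (n0 :: rest)[i] "radiance" = true
          · have hp : pickB_pref ["tbb_", "albedo_", "radiance"] 0 (n0 :: rest)[i] = some 2 := by
              rw [pref_eval, hswt, hswa, hswr]; simp
            rw [key_eval_pref i hcE hp]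
            have hge : ¬ (i < im) := fun hlt => by
              have := hm3 i hi hlt; simp_all
            exact kLt_false_of (by omega)
          · simp only [Bool.not_eq_true] at hswr
            have hp : pickB_pref ["tbb_", "albedo_", "radiance"] 0 (n0 :: rest)[i] = none := by
              rw [pref_eval, hswt, hswa, hswr]; simp
            rw [key_eval_fallback i hcE hp]; exact kLt_false_of (by omega)
        · refine ⟨im, him, ?_⟩
          rw [hm1]
          have hcm := hnoE m2 (hm1 ▸ List.getElem_mem him)
          have hswt := hsw0 m2 (hm1 ▸ List.getElem_mem him)
          have hswa := hsw1 m2 (hm1 ▸ List.getElem_mem him)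
          have hp : pickB_pref ["tbb_", "albedo_", "radiance"] 0 m2 = some 2 := by
            rw [pref_eval, hswt, hswa, hm2]; simp
          rw [key_eval_pref im hcm hp]
        · intro i hi hkey
          have hcE := hnoE _ (List.getElem_mem hi)
          have hswt := hsw0 _ (List.getElem_mem hi)
          have hswa := hsw1 _ (List.getElem_mem hi)
          by_cases hswr : PySem.Str.startswith (n0 :: rest)[i] "radiance" = true
          · have hp : pickB_pref ["tbb_", "albedo_", "radiance"] 0 (n0 :: rest)[i] = some 2 := by
              rw [pref_eval, hswt, hswa, hswr]; simp
            rw [key_eval_pref i hcE hp] at hkey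
            have : i = im := by simpa using hkey
            subst this; exact hm1
          · simp only [Bool.not_eq_true] at hswr
            have hp : pickB_pref ["tbb_", "albedo_", "radiance"] 0 (n0 :: rest)[i] = none := by
              rw [pref_eval, hswt, hswa, hswr]; simp
            rw [key_eval_fallback i hcE hp] at hkey; simp at hkey
      | none =>
        simp only [pickA_prefix, h0, h1, h2] at hP
        cases hP

-- case 3: no exact name and no prefix match: A falls back to names[0]
theorem case_fallback (n0 : String) (rest : List String)
    (hE : pickA_exact (n0 :: rest) ["tbb_13", "tbb_14", "tbb_15", "tbb_07", "tbb"] = none)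
    (hP : pickA_prefix (n0 :: rest) ["tbb_", "albedo_", "radiance"] = none) :
    (pickB_fold rest 1 (pickB_key 0 n0, n0)).2 = n0 := by
  have hnoE := no_exact_contains hE
  have h0 : pickA_inner "tbb_" (n0 :: rest) = none := by
    cases h : pickA_inner "tbb_" (n0 :: rest) with
    | none => rfl
    | some x => simp only [pickA_prefix, h] at hP; exact hP
  have h1 : pickA_inner "albedo_" (n0 :: rest) = none := by
    cases h : pickA_inner "albedo_" (n0 :: rest) with
    | none => rfl
    | some x => simp only [pickA_prefix, h0, h] at hP; exact hP
  have h2 : pickA_inner "radiance" (n0 :: rest) = none := by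
    cases h : pickA_inner "radiance" (n0 :: rest) with
    | none => rfl
    | some x => simp only [pickA_prefix, h0, h1, h] at hP; exact hP
  have hsw0 := pickA_inner_none h0
  have hsw1 := pickA_inner_none h1
  have hsw2 := pickA_inner_none h2
  have hkeys : ∀ i, ∀ _ : i < (n0 :: rest).length, pickB_key i (n0 :: rest)[i] = (2, 0, i) := by
    intro i hi
    have hcE := hnoE _ (List.getElem_mem hi)
    have hp : pickB_pref ["tbb_", "albedo_", "radiance"] 0 (n0 :: rest)[i] = none := by
      rw [pref_eval, hsw0 _ (List.getElem_mem hi), hsw1 _ (List.getElem_mem hi),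
        hsw2 _ (List.getElem_mem hi)]
      simp
    exact key_eval_fallback i hcE hp
  refine fold_determines (kstar := (2, 0, 0)) (a := n0) ?_ ?_ ?_
  · intro i hi
    rw [hkeys i hi]
    exact kLt_false_of (by omega)
  · exact ⟨0, by simp, by simpa using hkeys 0 (by simp)⟩
  · intro i hi hkey
    rw [hkeys i hi] at hkey
    have : i = 0 := by simpa using hkey
    subst this; rfl

-- the two ports agree on every non-empty list
theorem main_cons (n0 : String) (rest : List String) :
    pick_primary_variable_py (n0 :: rest) = pick_primary_variable_py_alt (n0 :: rest) := by
  unfold pick_primary_variable_py pick_primary_variable_py_alt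
  cases hE : pickA_exact (n0 :: rest) ["tbb_13", "tbb_14", "tbb_15", "tbb_07", "tbb"] with
  | some e => exact (case_exact n0 rest e hE).symm
  | none =>
    cases hP : pickA_prefix (n0 :: rest) ["tbb_", "albedo_", "radiance"] with
    | some m => exact (case_prefix n0 rest m hE hP).symm
    | none => exact (case_fallback n0 rest hE hP).symm

-- ===== VERDICT (by name: the statement is the Claim_ definition above) =====
theorem pick_primary_variable_py_spec : Claim_equal_pick_primary_variable_py := by
  intro var_names _ hpre
  unfold Spec_pick_primary_variable_py
  cases var_names with
  | nil => exact absurd rfl hpre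
  | cons n0 rest => exact main_cons n0 rest
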